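-- pv_equiv track=rewrite | github.com/Sadomtsevvs/Leetcode | Meta. Revenue Milestones.py | getMilestoneDays
-- ===== SOURCE A (Python) =====
-- from bisect import bisect_left
--
-- def getMilestoneDays(revenues, milestones):
--     s = 0
--     for i in range(len(revenues)):
--         revenues[i] += s
--         s = revenues[i]
--     ans = []
--     for milestone in milestones:
--         if revenues[-1] < milestone:
--             ind = -1
--         else:
--             ind = bisect_left(revenues, milestone) + 1
--         ans.append(ind)
--     return ans
-- ===== SOURCE B (Python) =====
-- def _batch(prefix, lo, hi, qs, ans):
--     # one walk of the implicit binary-search tree, carrying the whole query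
--     # batch and partitioning it at each midpoint (offline batched search)
--     if not qs:
--         return
--     if lo >= hi:
--         for _, i in qs:
--             ans[i] = lo + 1
--         return
--     mid = (lo + hi) // 2
--     left = [q for q in qs if not prefix[mid] < q[0]]
--     right = [q for q in qs if prefix[mid] < q[0]]
--     _batch(prefix, lo, mid, left, ans)
--     _batch(prefix, mid + 1, hi, right, ans)
--
--
-- def getMilestoneDays(revenues, milestones):
--     s = 0
--     for i in range(len(revenues)):
--         revenues[i] += s
--         s = revenues[i]
--     ans = [-1] * len(milestones)
--     if revenues:
--         total = revenues[-1]
--         reached = [(m, i) for i, m in enumerate(milestones) if m <= total]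
--         _batch(revenues, 0, len(revenues), reached, ans)
--     return ans
-- ===== Notes on version B (the rewrite author's own statement) =====
-- stated objective: alternative
-- what changed: Replaces the per-milestone bisect_left calls by a single offline batched search: milestones are paired with their original indices up front, and one recursive walk of the implicit binary-search tree partitions the whole query batch at each midpoint, scattering day numbers into a preallocated answer list; a prefilter against the final total assigns the -1 sentinel without any search.
import Mathlib
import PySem

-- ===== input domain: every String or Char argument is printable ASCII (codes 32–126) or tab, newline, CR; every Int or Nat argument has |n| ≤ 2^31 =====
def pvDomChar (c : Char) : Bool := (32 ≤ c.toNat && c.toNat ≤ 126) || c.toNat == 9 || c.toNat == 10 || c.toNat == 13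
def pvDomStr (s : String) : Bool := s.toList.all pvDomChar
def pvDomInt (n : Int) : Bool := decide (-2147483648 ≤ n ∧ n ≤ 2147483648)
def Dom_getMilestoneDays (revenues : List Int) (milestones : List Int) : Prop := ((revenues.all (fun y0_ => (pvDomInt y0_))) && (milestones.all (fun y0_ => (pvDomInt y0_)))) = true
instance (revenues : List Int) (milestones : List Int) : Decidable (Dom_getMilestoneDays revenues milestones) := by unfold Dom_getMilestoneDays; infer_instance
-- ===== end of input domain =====

-- B answers all milestones with ONE batched walk of the implicit binary-search tree
-- (queries partitioned at each midpoint, results scattered by original index) instead of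
-- A's per-milestone bisect_left; equivalence is about the return value (both A and B also
-- overwrite `revenues` with its prefix sums in Python).


-- ===== PORT A =====
-- `revenues[i] += s; s = revenues[i]` over i in range(len(revenues)); indices are 0..n-1, all
-- in range, so Nat indexing with List.set/getD is exact here.
def pvStepA (st : List Int × Int) (i : Nat) : List Int × Int :=
  let v := st.1.getD i 0 + st.2
  (st.1.set i v, v)

def getMilestoneDays (revenues : List Int) (milestones : List Int) : List Int :=
  let st := (List.range revenues.length).foldl pvStepA (revenues, 0)
  -- `revenues[-1]` raises IndexError on an empty list: ported with pyGet?; the `.getD 0`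
  -- fallback is unreachable under Pre_getMilestoneDays.
  milestones.foldl (fun ans m =>
    ans ++ [ if (PySem.List.pyGet? st.1 (-1)).getD 0 < m then (-1 : Int)
             else ((PySem.List.bisectLeft st.1 m : Int) + 1) ]) []

-- ===== PORT B =====
-- Source B's `_batch(prefix, lo, hi, qs, ans)`: one walk of the implicit search tree carrying the
-- query batch. `prefix[mid]` is always in range (lo ≤ mid < hi ≤ len), so `.getD 0` is exact;
-- `ans[i] = …` writes at an enumerate index, which is ≥ 0, so `.toNat` is exact.
def pvBatch (p : List Int) : Nat → Nat → Nat → List (Int × Int) → List Int → List Int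
  | 0, _, _, _, ans => ans   -- fuel guard only (recursion depth ≤ hi - lo < fuel at every call)
  | fuel + 1, lo, hi, qs, ans =>
    if qs = [] then ans
    else if hi ≤ lo then qs.foldl (fun a q => a.set q.2.toNat ((lo : Int) + 1)) ans
    else
      pvBatch p fuel ((lo + hi) / 2 + 1) hi
        (qs.filter (fun q => decide (p.getD ((lo + hi) / 2) 0 < q.1)))
        (pvBatch p fuel lo ((lo + hi) / 2)
          (qs.filter (fun q => decide (¬ p.getD ((lo + hi) / 2) 0 < q.1))) ans)

-- Source B's first loop is A's (the prefix sums, written in place).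
def pvStepB (st : List Int × Int) (i : Nat) : List Int × Int :=
  let v := st.1.getD i 0 + st.2
  (st.1.set i v, v)

def getMilestoneDays_alt (revenues : List Int) (milestones : List Int) : List Int :=
  let st := (List.range revenues.length).foldl pvStepB (revenues, 0)
  let p := st.1
  let ans := List.replicate milestones.length (-1 : Int)
  if p = [] then ans
  else
    -- `total = revenues[-1]`: p is nonempty here, so the `.getD 0` fallback is unreachable
    let total := (PySem.List.pyGet? p (-1)).getD 0
    let reached := ((PySem.List.enumerate milestones).filter
        (fun q => decide (q.2 ≤ total))).map (fun q => (q.2, q.1))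
    pvBatch p (p.length + 1) 0 p.length reached ans

-- ===== PRECONDITION & SPEC =====
-- Pre_ excludes only inputs on which A RAISES: empty revenues with a nonempty milestones list
-- (`revenues[-1]` then raises IndexError).
def Pre_getMilestoneDays (revenues : List Int) (milestones : List Int) : Prop :=
  milestones = [] ∨ revenues ≠ []
instance (revenues : List Int) (milestones : List Int) : Decidable (Pre_getMilestoneDays revenues milestones) := by unfold Pre_getMilestoneDays; infer_instance

def pvWitness_getMilestoneDays : List Int × List Int := ([2, 3, -1, 6], [4, 10, 4])

def Spec_getMilestoneDays (revenues : List Int) (milestones : List Int) (out : List Int) : Prop := out = getMilestoneDays_alt revenues milestones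
instance (revenues : List Int) (milestones : List Int) (out : List Int) : Decidable (Spec_getMilestoneDays revenues milestones out) := by unfold Spec_getMilestoneDays; infer_instance

-- ===== CLAIM (what is proved, stated in full; the proofs are below) =====
def Claim_equal_getMilestoneDays : Prop := ∀ (revenues : List Int) (milestones : List Int), Dom_getMilestoneDays revenues milestones → Pre_getMilestoneDays revenues milestones → Spec_getMilestoneDays revenues milestones (getMilestoneDays revenues milestones)

-- ===== LEMMAS AND PROOFS =====

-- prefix sums of xs starting from running total s
def pvPref (xs : List Int) (s : Int) : List Int :=
  match xs with
  | [] => []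
  | r :: t => (s + r) :: pvPref t (s + r)

theorem pvPref_ne_nil (xs : List Int) (s : Int) (h : xs ≠ []) : pvPref xs s ≠ [] := by
  cases xs with
  | nil => exact absurd rfl h
  | cons r t => simp [pvPref]

-- A's (and B's identical) first loop
theorem pvLoopA_eq (rest done : List Int) (s : Int) :
    (List.range' done.length rest.length).foldl pvStepA (done ++ rest, s)
      = (done ++ pvPref rest s, s + rest.sum) := by
  induction rest generalizing done s with
  | nil => simp [pvPref]
  | cons r t ih =>
    rw [List.length_cons, List.range'_succ, List.foldl_cons]
    have hget : (done ++ r :: t).getD done.length 0 = r := by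
      simp [List.getD_eq_getElem?_getD]
    have hset : (done ++ r :: t).set done.length (r + s) = done ++ (r + s) :: t := by
      simp
    have hstep : pvStepA (done ++ r :: t, s) done.length = (done ++ (r + s) :: t, r + s) := by
      simp [pvStepA, hset]
    rw [hstep]
    have h1 : done ++ (r + s) :: t = (done ++ [r + s]) ++ t := by simp
    rw [h1]
    have h2 := ih (done ++ [r + s]) (r + s)
    simp only [List.length_append, List.length_singleton] at h2
    rw [h2]
    simp only [pvPref, List.sum_cons, Prod.mk.injEq, List.append_assoc, List.singleton_append]
    refine ⟨by rw [show r + s = s + r from by ring], by ring⟩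

theorem pvStepB_eq : pvStepB = pvStepA := rfl

-- the path each single query takes through the search tree (= bisect_left's recursion)
def pvBS (p : List Int) (m : Int) (lo hi : Nat) : Nat :=
  if _h : lo < hi then
    if p.getD ((lo + hi) / 2) 0 < m then pvBS p m ((lo + hi) / 2 + 1) hi
    else pvBS p m lo ((lo + hi) / 2)
  else lo
termination_by hi - lo
decreasing_by all_goals omega

theorem pvBS_eq_loop (xs : List Int) (m : Int) (fuel lo hi : Nat)
    (hhi : hi ≤ xs.length) (hf : hi - lo ≤ fuel) :
    PySem.List.bisectLeftLoop xs m fuel lo hi = pvBS xs m lo hi := by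
  induction fuel generalizing lo hi with
  | zero =>
    rw [pvBS]
    simp only [PySem.List.bisectLeftLoop]
    have : ¬ lo < hi := by omega
    simp [this]
  | succ n ih =>
    rw [pvBS]
    simp only [PySem.List.bisectLeftLoop]
    by_cases hlt : lo < hi
    · have hmid : (lo + hi) / 2 < xs.length := by omega
      have hsome : xs[(lo + hi) / 2]? = some (xs[(lo + hi) / 2]'hmid) := by
        simp [hmid]
      simp only [hlt, if_true, hsome]
      have hg : xs.getD ((lo + hi) / 2) 0 = xs[(lo + hi) / 2]'hmid := by
        simp [List.getD_eq_getElem?_getD, hmid]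
      rw [hg]
      by_cases hc : xs[(lo + hi) / 2]'hmid < m
      · simp only [hc, if_true]; exact ih _ _ hhi (by omega)
      · simp only [hc, if_false]; exact ih _ _ (by omega) (by omega)
    · simp [hlt]

theorem pvBS_eq_bisectLeft (xs : List Int) (m : Int) :
    PySem.List.bisectLeft xs m = pvBS xs m 0 xs.length := by
  unfold PySem.List.bisectLeft
  exact pvBS_eq_loop xs m xs.length 0 xs.length le_rfl (by omega)

theorem pvFoldlSet_length (lo : Nat) (qs : List (Int × Int)) (ans : List Int) :
    (qs.foldl (fun a q => a.set q.2.toNat ((lo : Int) + 1)) ans).length = ans.length := by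
  induction qs generalizing ans with
  | nil => rfl
  | cons q t ih => rw [List.foldl_cons, ih]; simp

theorem pvBatch_length (p : List Int) (fuel : Nat) : ∀ (lo hi : Nat)
    (qs : List (Int × Int)) (ans : List Int),
    (pvBatch p fuel lo hi qs ans).length = ans.length := by
  induction fuel with
  | zero => intro lo hi qs ans; rfl
  | succ n ih =>
    intro lo hi qs ans
    rw [pvBatch]
    split_ifs
    · rfl
    · exact pvFoldlSet_length lo qs ans
    · rw [ih, ih]

theorem pvFoldlSet_untouched (lo : Nat) (qs : List (Int × Int)) (ans : List Int) (j : Nat)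
    (hj : ∀ q ∈ qs, q.2.toNat ≠ j) :
    (qs.foldl (fun a q => a.set q.2.toNat ((lo : Int) + 1)) ans)[j]? = ans[j]? := by
  induction qs generalizing ans with
  | nil => rfl
  | cons q t ih =>
    rw [List.foldl_cons, ih _ (fun q hq => hj q (List.mem_cons_of_mem _ hq))]
    exact List.getElem?_set_ne (hj q List.mem_cons_self)

theorem pvBatch_untouched (p : List Int) (fuel : Nat) : ∀ (lo hi : Nat)
    (qs : List (Int × Int)) (ans : List Int) (j : Nat), (∀ q ∈ qs, q.2.toNat ≠ j) →
    (pvBatch p fuel lo hi qs ans)[j]? = ans[j]? := by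
  induction fuel with
  | zero => intro lo hi qs ans j hj; rfl
  | succ n ih =>
    intro lo hi qs ans j hj
    rw [pvBatch]
    split_ifs
    · rfl
    · exact pvFoldlSet_untouched lo qs ans j hj
    · rw [ih _ _ _ _ _ (fun q hq => hj q (List.mem_of_mem_filter hq)),
          ih _ _ _ _ _ (fun q hq => hj q (List.mem_of_mem_filter hq))]

theorem pvFoldlSet_hit (lo : Nat) (qs : List (Int × Int)) (ans : List Int)
    (q : Int × Int) (hq : q ∈ qs) (hnd : (qs.map (fun q => q.2.toNat)).Nodup)
    (hlt : q.2.toNat < ans.length) :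
    (qs.foldl (fun a q => a.set q.2.toNat ((lo : Int) + 1)) ans)[q.2.toNat]? = some ((lo : Int) + 1) := by
  induction qs generalizing ans with
  | nil => cases hq
  | cons q0 t ih =>
    rw [List.map_cons, List.nodup_cons] at hnd
    rcases List.mem_cons.mp hq with h0 | hmem
    · subst h0
      rw [List.foldl_cons]
      have huntouched : ∀ q' ∈ t, q'.2.toNat ≠ q.2.toNat := by
        intro q' hq' he
        exact hnd.1 (he ▸ List.mem_map_of_mem hq')
      rw [pvFoldlSet_untouched lo t _ _ huntouched]
      rw [List.getElem?_set_self']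
      simp [hlt]
    · rw [List.foldl_cons]
      exact ih _ hmem hnd.2 (by simpa using hlt)

theorem pvBatch_hit (p : List Int) (fuel : Nat) : ∀ (lo hi : Nat), hi - lo < fuel →
    ∀ (qs : List (Int × Int)) (ans : List Int) (q : Int × Int), q ∈ qs →
    (qs.map (fun q => q.2.toNat)).Nodup → q.2.toNat < ans.length →
    (pvBatch p fuel lo hi qs ans)[q.2.toNat]? = some ((pvBS p q.1 lo hi : Int) + 1) := by
  induction fuel with
  | zero => intro lo hi hf; omega
  | succ n ih =>
    intro lo hi hf qs ans q hq hnd hlt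
    rw [pvBatch]
    split_ifs with h1 h2
    · simp_all
    · rw [pvBS, dif_neg (by omega)]
      exact pvFoldlSet_hit lo qs ans q hq hnd hlt
    · have hlohi : lo < hi := by omega
      have hsubl : ∀ (P : Int × Int → Bool),
          ((qs.filter P).map (fun q => q.2.toNat)).Nodup :=
        fun P => ((qs.filter_sublist (p := P)).map _).nodup hnd
      by_cases hc : p.getD ((lo + hi) / 2) 0 < q.1
      · -- q goes right
        have hqr : q ∈ qs.filter (fun q => decide (p.getD ((lo + hi) / 2) 0 < q.1)) :=
          List.mem_filter.mpr ⟨hq, by simpa using hc⟩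
        rw [ih _ _ (by omega) _ _ q hqr (hsubl _) (by rw [pvBatch_length]; exact hlt)]
        conv_rhs => rw [pvBS]
        rw [dif_pos hlohi, if_pos hc]
      · -- q goes left: the right-hand pass never touches q's index
        have huntouched : ∀ q' ∈ qs.filter (fun q => decide (p.getD ((lo + hi) / 2) 0 < q.1)),
            q'.2.toNat ≠ q.2.toNat := by
          intro q' hq' he
          have hq'mem := List.mem_of_mem_filter hq'
          have : q' = q := List.inj_on_of_nodup_map hnd hq'mem hq he
          subst this
          have := (List.mem_filter.mp hq').2
          simp at this
          exact hc this
        rw [pvBatch_untouched _ _ _ _ _ _ _ huntouched]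
        have hql : q ∈ qs.filter (fun q => decide (¬ p.getD ((lo + hi) / 2) 0 < q.1)) :=
          List.mem_filter.mpr ⟨hq, by simp only [decide_eq_true_iff]; exact hc⟩
        rw [ih _ _ (by omega) _ _ q hql (hsubl _) hlt]
        conv_rhs => rw [pvBS]
        rw [dif_pos hlohi, if_neg hc]

-- indices appearing in B's `reached` list are the enumerate indices: pairwise distinct
theorem pvReached_nodup (milestones : List Int) (total : Int) :
    ((((PySem.List.enumerate milestones).filter (fun q => decide (q.2 ≤ total))).map
        (fun q => (q.2, q.1))).map (fun q => q.2.toNat)).Nodup := by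
  rw [List.map_map]
  have h1 : (((PySem.List.enumerate milestones).filter (fun q => decide (q.2 ≤ total))).map
      ((fun (q : Int × Int) => q.2.toNat) ∘ (fun q => (q.2, q.1))))
        = ((PySem.List.enumerate milestones).filter (fun q => decide (q.2 ≤ total))).map
            (fun q => q.1.toNat) := rfl
  rw [h1]
  have h2 : ((PySem.List.enumerate milestones).map (fun (q : Int × Int) => q.1.toNat)).Nodup := by
    have : (PySem.List.enumerate milestones).map (fun (q : Int × Int) => q.1.toNat)
        = List.range milestones.length := by
      apply List.ext_getElem
      · simp [PySem.List.length_enumerate]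
      · intro k h1 h2
        simp [PySem.List.getElem_enumerate]
    rw [this]; exact List.nodup_range
  exact (((PySem.List.enumerate milestones).filter_sublist).map _).nodup h2

theorem pvReached_mem (milestones : List Int) (total : Int) (q : Int × Int) :
    q ∈ (((PySem.List.enumerate milestones).filter (fun q => decide (q.2 ≤ total))).map
        (fun q => (q.2, q.1)))
      ↔ ∃ (k : Nat) (h : k < milestones.length), q = (milestones[k], (k : Int)) ∧ milestones[k] ≤ total := by
  simp only [List.mem_map, List.mem_filter, PySem.List.mem_enumerate_iff]
  constructor
  · rintro ⟨⟨i, m⟩, ⟨⟨k, hk, he⟩, hle⟩, hmap⟩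
    obtain ⟨h1, h2⟩ := Prod.mk.injEq .. ▸ he
    refine ⟨k, hk, ?_, ?_⟩
    · subst hmap; simp_all
    · simp_all
  · rintro ⟨k, hk, he, hle⟩
    exact ⟨((k : Int), milestones[k]), ⟨⟨k, hk, by simp⟩, by simpa using hle⟩, by simp [he]⟩

-- ===== VERDICT (by name: the statement is the Claim_ definition above) =====
theorem getMilestoneDays_spec : Claim_equal_getMilestoneDays := by
  intro revenues milestones _hdom hpre
  unfold Spec_getMilestoneDays getMilestoneDays getMilestoneDays_alt
  rw [pvStepB_eq]
  have hA : (List.range revenues.length).foldl pvStepA (revenues, 0)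
      = (pvPref revenues 0, 0 + revenues.sum) := by
    have h := pvLoopA_eq revenues [] 0
    simpa [List.range_eq_range'] using h
  rw [hA, PySem.List.foldl_append_singleton_eq_map]
  dsimp only
  by_cases hrev : revenues = []
  · subst hrev
    have hms : milestones = [] := by
      rcases hpre with h | h
      · exact h
      · exact absurd rfl h
    subst hms
    rfl
  · have hne := pvPref_ne_nil revenues 0 hrev
    rw [if_neg hne]
    set p := pvPref revenues 0 with hp
    set total := (PySem.List.pyGet? p (-1)).getD 0 with htot
    set reached := ((PySem.List.enumerate milestones).filter
        (fun q => decide (q.2 ≤ total))).map (fun q => (q.2, q.1)) with hreached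
    apply List.ext_getElem?
    intro i
    by_cases hi : i < milestones.length
    · rw [List.nil_append, List.getElem?_map, List.getElem?_eq_getElem hi]
      simp only [Option.map_some]
      by_cases hle : milestones[i] ≤ total
      · have hq : ((milestones[i], (i : Int)) : Int × Int) ∈ reached := by
          rw [hreached, pvReached_mem]
          exact ⟨i, hi, rfl, hle⟩
        have hbatch := pvBatch_hit p (p.length + 1) 0 p.length (by omega) reached
          (List.replicate milestones.length (-1 : Int)) _ hq
          (by rw [hreached]; exact pvReached_nodup milestones total)
          (by simpa using hi)
        simp only [Int.toNat_natCast] at hbatch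
        rw [hbatch, pvBS_eq_bisectLeft, if_neg (by omega : ¬ total < milestones[i])]
      · have huntouched : ∀ q ∈ reached, q.2.toNat ≠ i := by
          intro q hq he
          rw [hreached, pvReached_mem] at hq
          obtain ⟨k, hk, hqe, hkle⟩ := hq
          subst hqe
          simp only [Int.toNat_natCast] at he
          subst he
          simp_all
        rw [pvBatch_untouched _ _ _ _ _ _ _ huntouched,
          if_pos (by omega : total < milestones[i])]
        simp [hi]
    · have h1 : i ≥ milestones.length := by omega
      rw [List.getElem?_eq_none (by simpa using h1),
        List.getElem?_eq_none (by rw [pvBatch_length]; simpa using h1)]
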